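-- pv_equiv track=rewrite | github.com/Horsmann/sharepoint-to-text | sharepoint2text/extractors/pdf_extractor.py | _extract_tables_from_text_simple
-- ===== SOURCE A (Python) =====
-- from typing import Any, Generator, List
--
-- def _extract_tables_from_text_simple(lines: List[str]) -> List[List[List[str]]]:
--     """Fallback extractor for non-numeric tables with consistent columns."""
--     tables: List[List[List[str]]] = []
--     current_rows: List[List[str]] = []
--     current_cols = 0
--
--     def flush_current() -> None:
--         if len(current_rows) >= 2:
--             tables.append(current_rows.copy())
--
--     for line in lines:
--         if not line:
--             flush_current()
--             current_rows = []
--             current_cols = 0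
--             continue
--
--         tokens = line.split()
--         if len(tokens) < 2:
--             flush_current()
--             current_rows = []
--             current_cols = 0
--             continue
--
--         if current_cols == 0:
--             current_cols = len(tokens)
--             current_rows = [tokens]
--             continue
--
--         if len(tokens) == current_cols:
--             current_rows.append(tokens)
--             continue
--
--         flush_current()
--         current_rows = [tokens]
--         current_cols = len(tokens)
--
--     flush_current()
--     return tables
-- ===== SOURCE B (Python) =====
-- from itertools import groupby
-- from typing import List
--
--
-- def _extract_tables_from_text_simple(lines: List[str]) -> List[List[List[str]]]:
--     """Fallback extractor for non-numeric tables with consistent columns."""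
--     keyed = [(toks, len(toks) if len(toks) >= 2 else None)
--              for toks in (line.split() for line in lines)]
--     tables: List[List[List[str]]] = []
--     for key, grp in groupby(keyed, key=lambda p: p[1]):
--         if key is not None:
--             rows = [t for t, _ in grp]
--             if len(rows) >= 2:
--                 tables.append(rows)
--     return tables
-- ===== Notes on version B (the rewrite author's own statement) =====
-- stated objective: idiomatic
-- what changed: Replaces the stateful current_rows/current_cols accumulator loop with a key-then-groupby pipeline: each line is mapped to (tokens, column-count-or-None), itertools.groupby yields maximal runs of equal keys, and runs with a valid key and at least 2 rows become tables.
import Mathlib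
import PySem

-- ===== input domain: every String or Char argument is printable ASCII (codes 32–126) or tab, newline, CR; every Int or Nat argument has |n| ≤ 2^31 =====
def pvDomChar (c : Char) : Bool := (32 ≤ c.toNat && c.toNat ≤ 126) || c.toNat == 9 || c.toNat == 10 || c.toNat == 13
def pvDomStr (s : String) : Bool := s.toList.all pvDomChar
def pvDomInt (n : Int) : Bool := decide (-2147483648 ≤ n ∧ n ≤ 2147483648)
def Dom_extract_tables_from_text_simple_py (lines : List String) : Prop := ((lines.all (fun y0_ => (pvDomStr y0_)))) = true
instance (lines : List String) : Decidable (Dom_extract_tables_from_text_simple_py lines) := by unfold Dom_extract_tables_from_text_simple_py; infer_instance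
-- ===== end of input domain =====

-- ===== PORT A =====
-- B changes only the decomposition (groupby pipeline instead of an explicit state machine);
-- both return the same value; A does not mutate its argument.
def pvFlushA (tables : List (List (List String))) (rows : List (List String)) :
    List (List (List String)) :=
  if 2 ≤ rows.length then tables ++ [rows] else tables

def pvGoA : List String → List (List (List String)) → List (List String) → Nat →
    List (List (List String))
  | [], tables, rows, _ => pvFlushA tables rows
  | line :: rest, tables, rows, cols =>
    if line = "" then pvGoA rest (pvFlushA tables rows) [] 0
    else
      let tokens := PySem.Str.split₀ line
      if tokens.length < 2 then pvGoA rest (pvFlushA tables rows) [] 0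
      else if cols = 0 then pvGoA rest tables [tokens] tokens.length
      else if tokens.length = cols then pvGoA rest tables (rows ++ [tokens]) cols
      else pvGoA rest (pvFlushA tables rows) [tokens] tokens.length

def extract_tables_from_text_simple_py (lines : List String) : List (List (List String)) :=
  pvGoA lines [] [] 0

-- ===== PORT B =====
def pvKeyB (line : String) : List String × Option Nat :=
  let toks := PySem.Str.split₀ line
  (toks, if 2 ≤ toks.length then some toks.length else none)

-- itertools.groupby: maximal runs of consecutive equal keys
def pvRunsB : List (List String × Option Nat) → List (Option Nat × List (List String))
  | [] => []
  | (t, k) :: rest =>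
    match pvRunsB rest with
    | [] => [(k, [t])]
    | (k', g) :: gs => if k = k' then (k, t :: g) :: gs else (k, [t]) :: (k', g) :: gs

def pvPickB (p : Option Nat × List (List String)) : Option (List (List String)) :=
  match p.1 with
  | some _ => if 2 ≤ p.2.length then some p.2 else none
  | none => none

def extract_tables_from_text_simple_py_alt (lines : List String) : List (List (List String)) :=
  (pvRunsB (lines.map pvKeyB)).filterMap pvPickB

-- ===== PRECONDITION & SPEC =====
def Spec_extract_tables_from_text_simple_py (lines : List String) (out : List (List (List String))) : Prop := out = extract_tables_from_text_simple_py_alt lines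
instance (lines : List String) (out : List (List (List String))) : Decidable (Spec_extract_tables_from_text_simple_py lines out) := by unfold Spec_extract_tables_from_text_simple_py; infer_instance

-- ===== CLAIM (what is proved, stated in full; the proofs are below) =====
def Claim_equal_extract_tables_from_text_simple_py : Prop := ∀ (lines : List String), Dom_extract_tables_from_text_simple_py lines → Spec_extract_tables_from_text_simple_py lines (extract_tables_from_text_simple_py lines)

-- ===== LEMMAS AND PROOFS =====
def pvAltCore (keyed : List (List String × Option Nat)) : List (List (List String)) :=
  (pvRunsB keyed).filterMap pvPickB

-- the head group of pvRunsB carries the key of the first element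
theorem pvRunsB_head_key (t : List String) (k : Option Nat)
    (xs : List (List String × Option Nat)) :
    ∃ g gs, pvRunsB ((t, k) :: xs) = (k, g) :: gs := by
  simp only [pvRunsB]
  cases pvRunsB xs with
  | nil => exact ⟨[t], [], rfl⟩
  | cons hd tl =>
    obtain ⟨k', g⟩ := hd
    by_cases h : k = k'
    · subst h; simp
    · simp [h]

-- a none-keyed element at the front contributes nothing
theorem pvAltCore_none_cons (t : List String) (xs : List (List String × Option Nat)) :
    pvAltCore ((t, none) :: xs) = pvAltCore xs := by
  simp only [pvAltCore, pvRunsB]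
  cases hxs : pvRunsB xs with
  | nil => simp [pvPickB]
  | cons hd tl =>
    obtain ⟨k', g⟩ := hd
    by_cases h : (none : Option Nat) = k'
    · subst h; simp [pvPickB]
    · simp [h, pvPickB]

-- pvRunsB over a constant-key nonempty prefix
theorem pvRunsB_run (rows : List (List String)) (c : Nat)
    (rest : List (List String × Option Nat)) (hne : rows ≠ []) :
    pvRunsB (rows.map (fun r => (r, some c)) ++ rest) =
      match pvRunsB rest with
      | [] => [(some c, rows)]
      | (k', g) :: gs =>
          if some c = k' then (some c, rows ++ g) :: gs
          else (some c, rows) :: (k', g) :: gs := by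
  induction rows with
  | nil => exact absurd rfl hne
  | cons t rows' ih =>
    cases hrows' : rows' with
    | nil =>
      simp only [List.map, List.nil_append, List.cons_append, pvRunsB]
    | cons t2 rows'' =>
      subst hrows'
      have ih' := ih (by simp)
      have hsplit : List.map (fun r => (r, some c)) (t :: t2 :: rows'') ++ rest
          = (t, some c) :: (List.map (fun r => (r, some c)) (t2 :: rows'') ++ rest) := by simp
      rw [hsplit]
      generalize hxs : List.map (fun r => (r, some c)) (t2 :: rows'') ++ rest = xs at ih'
      simp only [pvRunsB]
      rw [ih']
      cases pvRunsB rest with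
      | nil => simp
      | cons hd tl =>
        obtain ⟨k', g⟩ := hd
        by_cases h : some c = k' <;> simp [h]

theorem pvAltCore_run (rows : List (List String)) (c : Nat)
    (rest : List (List String × Option Nat)) (hne : rows ≠ [])
    (hkey : ∀ t k gs, pvRunsB rest = (t, k) :: gs → t ≠ some c) :
    pvAltCore (rows.map (fun r => (r, some c)) ++ rest) =
      (if 2 ≤ rows.length then [rows] else []) ++ pvAltCore rest := by
  simp only [pvAltCore, pvRunsB_run rows c rest hne]
  cases hrest : pvRunsB rest with
  | nil => by_cases h : 2 ≤ rows.length <;> simp [pvPickB, h]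
  | cons hd tl =>
    obtain ⟨k', g⟩ := hd
    have : some c ≠ k' := fun h => hkey k' g tl hrest h.symm
    simp only [this, if_false]
    by_cases h : 2 ≤ rows.length <;> simp [pvPickB, h]

-- main invariant: the A-loop with pending run state equals B on the keyed remainder
theorem pvGoA_eq (ls : List String) :
    (∀ tables, pvGoA ls tables [] 0 = tables ++ pvAltCore (ls.map pvKeyB)) ∧
    (∀ tables rows c, rows ≠ [] → c ≠ 0 →
      pvGoA ls tables rows c =
        tables ++ pvAltCore (rows.map (fun r => (r, some c)) ++ ls.map pvKeyB)) := by
  induction ls with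
  | nil =>
    refine ⟨fun tables => by simp [pvGoA, pvFlushA, pvAltCore, pvRunsB], ?_⟩
    intro tables rows c hne _
    have hrun : pvRunsB (rows.map (fun r => (r, some c))) = [(some c, rows)] := by
      simpa [pvRunsB] using pvRunsB_run rows c [] hne
    simp only [pvGoA, pvFlushA, pvAltCore, List.map_nil, List.append_nil, hrun]
    by_cases h : 2 ≤ rows.length <;> simp [pvPickB, h]
  | cons line ls ih =>
    obtain ⟨ihE, ihR⟩ := ih
    have hkeynone : ∀ line, (PySem.Str.split₀ line).length < 2 →
        pvKeyB line = (PySem.Str.split₀ line, none) := by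
      intro l hl
      simp only [pvKeyB]
      rw [if_neg (by omega)]
    constructor
    · intro tables
      by_cases hemp : line = ""
      · subst hemp
        simp only [pvGoA, ihE, pvFlushA]
        rw [List.map_cons, hkeynone "" (by decide), pvAltCore_none_cons]
        simp
      · simp only [pvGoA, if_neg hemp]
        set toks := PySem.Str.split₀ line with htoks
        by_cases hlen : toks.length < 2
        · simp only [if_pos hlen, ihE, pvFlushA]
          rw [List.map_cons, hkeynone line hlen, ← htoks, pvAltCore_none_cons]
          simp
        · rw [if_neg hlen]
          simp only [reduceIte]
          rw [ihR tables [toks] toks.length (by simp) (by omega)]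
          simp only [List.map_cons, pvKeyB, ← htoks]
          rw [if_pos (by omega)]
          simp
    · intro tables rows c hne hc
      by_cases hemp : line = ""
      · subst hemp
        simp only [pvGoA, ihE, pvFlushA]
        rw [List.map_cons, hkeynone "" (by decide),
          pvAltCore_run rows c _ hne ?hk, pvAltCore_none_cons]
        case hk =>
          intro t k gs hr ht
          obtain ⟨g', gs', hg⟩ := pvRunsB_head_key (PySem.Str.split₀ "") none (ls.map pvKeyB)
          rw [hg] at hr
          cases hr; cases ht
        by_cases h : 2 ≤ rows.length <;> simp [h]
      · simp only [pvGoA, if_neg hemp]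
        set toks := PySem.Str.split₀ line with htoks
        by_cases hlen : toks.length < 2
        · simp only [if_pos hlen, ihE, pvFlushA]
          rw [List.map_cons, hkeynone line hlen, ← htoks,
            pvAltCore_run rows c _ hne ?hk2, pvAltCore_none_cons]
          case hk2 =>
            intro t k gs hr ht
            obtain ⟨g', gs', hg⟩ := pvRunsB_head_key toks none (ls.map pvKeyB)
            rw [hg] at hr
            cases hr; cases ht
          by_cases h : 2 ≤ rows.length <;> simp [h]
        · rw [if_neg hlen, if_neg hc]
          by_cases heqc : toks.length = c
          · rw [if_pos heqc, ihR tables (rows ++ [toks]) c (by simp) hc]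
            subst heqc
            simp only [List.map_cons, List.map_append, pvKeyB, ← htoks]
            rw [if_pos (by omega)]
            simp
          · rw [if_neg heqc,
              ihR (pvFlushA tables rows) [toks] toks.length (by simp) (by omega)]
            simp only [List.map_cons, pvKeyB, ← htoks]
            rw [if_pos (by omega)]
            rw [pvAltCore_run rows c _ hne ?hk3]
            case hk3 =>
              intro t k gs hr ht
              obtain ⟨g', gs', hg⟩ :=
                pvRunsB_head_key toks (some toks.length)
                  ((List.map (fun r => (r, some toks.length)) [] : List _) ++ ls.map pvKeyB)
              simp only [List.map_nil, List.nil_append] at hg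
              rw [hg] at hr
              cases hr
              exact heqc (Option.some.injEq _ _ ▸ ht ▸ rfl)
            simp only [pvFlushA]
            by_cases h : 2 ≤ rows.length <;> simp [h]

-- ===== VERDICT (by name: the statement is the Claim_ definition above) =====
theorem extract_tables_from_text_simple_py_spec : Claim_equal_extract_tables_from_text_simple_py := by
  intro lines _
  show _ = _
  simpa [extract_tables_from_text_simple_py, extract_tables_from_text_simple_py_alt,
    pvAltCore] using (pvGoA_eq lines).1 []
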